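-- pv_equiv track=rewrite | github.com/TemsyChen/CS-Unit-1-Sprint-1-CS-Fundamentals | CS114_codesignal.py | alphabeticShift
-- ===== SOURCE A (Python) =====
-- import string
--
-- letters = string.ascii_lowercase
--
-- def alphabeticShift(inputString):
--     newString = []
--     for char in inputString:
--         if char == 'z':
--             newString.append('a')
--         else:
--             for i, letter in enumerate(letters):
--                 if letter == char:
--                     newString.append(letters[i+1])
--     return "".join(newString)
-- ===== SOURCE B (Python) =====
-- def alphabeticShift(inputString):
--     out = []
--     for char in inputString:
--         if 'a' <= char <= 'z':
--             out.append(chr((ord(char) - ord('a') + 1) % 26 + ord('a')))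
--     return "".join(out)
-- ===== Notes on version B (the rewrite author's own statement) =====
-- stated objective: idiomatic
-- what changed: Replaces the inner linear scan over the alphabet (and the special wrap branch) with a single lowercase range test plus direct modular arithmetic on the code point; non-lowercase characters are still dropped.
import Mathlib
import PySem

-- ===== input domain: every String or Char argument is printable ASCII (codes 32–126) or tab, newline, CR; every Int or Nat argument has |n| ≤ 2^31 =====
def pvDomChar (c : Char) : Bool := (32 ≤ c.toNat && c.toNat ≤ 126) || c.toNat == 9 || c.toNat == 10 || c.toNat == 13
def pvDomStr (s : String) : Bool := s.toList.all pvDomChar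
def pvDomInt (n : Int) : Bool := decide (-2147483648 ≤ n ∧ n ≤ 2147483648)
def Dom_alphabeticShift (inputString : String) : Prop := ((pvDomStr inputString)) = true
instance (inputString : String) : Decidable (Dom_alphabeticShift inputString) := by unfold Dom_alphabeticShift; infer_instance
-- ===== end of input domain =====

-- B replaces A's inner scan over the alphabet (and its special z branch) by a lowercase
-- range test plus direct modular arithmetic (idiomatic; return value only, no mutation).

-- ===== PORT A =====
def pvLetters : List Char := "abcdefghijklmnopqrstuvwxyz".toList

def alphabeticShift (inputString : String) : String :=
  let newString := inputString.toList.foldl (fun acc char =>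
    if char = 'z' then acc ++ ['a']
    else (PySem.List.enumerate pvLetters).foldl (fun acc2 p =>
      -- letters[i+1]: pyGet? is exact here; it is none only for i = 25, i.e. char = 'z',
      -- which the outer branch already handled, so Python never raises on this line
      if p.2 = char then acc2 ++ (PySem.List.pyGet? pvLetters (p.1 + 1)).toList else acc2) acc) []
  String.mk newString

-- ===== PORT B =====
def alphabeticShift_alt (inputString : String) : String :=
  String.mk (inputString.toList.foldl (fun acc c =>
    if 'a'.toNat ≤ c.toNat ∧ c.toNat ≤ 'z'.toNat then
      acc ++ [Char.ofNat ((c.toNat - 'a'.toNat + 1) % 26 + 'a'.toNat)]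
    else acc) [])

-- ===== PRECONDITION & SPEC =====
def Spec_alphabeticShift (inputString : String) (out : String) : Prop := out = alphabeticShift_alt inputString
instance (inputString : String) (out : String) : Decidable (Spec_alphabeticShift inputString out) := by unfold Spec_alphabeticShift; infer_instance

-- ===== CLAIM (what is proved, stated in full; the proofs are below) =====
def Claim_equal_alphabeticShift : Prop := ∀ (inputString : String), Dom_alphabeticShift inputString → Spec_alphabeticShift inputString (alphabeticShift inputString)

-- ===== LEMMAS AND PROOFS =====

-- per-character result of A's body
def gA (c : Char) : List Char :=
  if c = 'z' then ['a']
  else (PySem.List.enumerate pvLetters).flatMap (fun p =>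
    if p.2 = c then (PySem.List.pyGet? pvLetters (p.1 + 1)).toList else [])

-- per-character result of B's body
def gB (c : Char) : List Char :=
  if 'a'.toNat ≤ c.toNat ∧ c.toNat ≤ 'z'.toNat then
    [Char.ofNat ((c.toNat - 'a'.toNat + 1) % 26 + 'a'.toNat)]
  else []

theorem innerA_eq (c : Char) (L : List (Int × Char)) (acc : List Char) :
    L.foldl (fun acc2 p =>
      if p.2 = c then acc2 ++ (PySem.List.pyGet? pvLetters (p.1 + 1)).toList else acc2) acc
    = acc ++ L.flatMap (fun p =>
      if p.2 = c then (PySem.List.pyGet? pvLetters (p.1 + 1)).toList else []) := by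
  induction L generalizing acc with
  | nil => simp
  | cons h t ih => simp only [List.foldl_cons, List.flatMap_cons, ih]; split <;> simp

theorem stepA_eq (acc : List Char) (c : Char) :
    (if c = 'z' then acc ++ ['a']
     else (PySem.List.enumerate pvLetters).foldl (fun acc2 p =>
       if p.2 = c then acc2 ++ (PySem.List.pyGet? pvLetters (p.1 + 1)).toList else acc2) acc)
    = acc ++ gA c := by
  unfold gA; split
  · simp
  · exact innerA_eq c _ acc

theorem stepB_eq (acc : List Char) (c : Char) :
    (if 'a'.toNat ≤ c.toNat ∧ c.toNat ≤ 'z'.toNat then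
       acc ++ [Char.ofNat ((c.toNat - 'a'.toNat + 1) % 26 + 'a'.toNat)]
     else acc)
    = acc ++ gB c := by
  unfold gB; split <;> simp

theorem letters_range : ∀ p ∈ PySem.List.enumerate pvLetters,
    97 ≤ (p.2).toNat ∧ (p.2).toNat ≤ 122 := by decide

theorem g_eq (c : Char) : gA c = gB c := by
  by_cases hlow : 97 ≤ c.toNat ∧ c.toNat ≤ 122
  · obtain ⟨h1, h2⟩ := hlow
    have hc : Char.ofNat c.toNat = c := Char.ofNat_toNat c
    set n := c.toNat with hn
    rw [← hc]
    interval_cases n <;> decide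
  · have hz : c ≠ 'z' := by
      intro h; subst h; exact hlow (by decide)
    unfold gA gB
    rw [if_neg hz, if_neg (by simpa using hlow)]
    rw [List.flatMap_eq_nil_iff]
    intro p hp
    have hr := letters_range p hp
    rw [if_neg]
    intro h
    rw [h] at hr
    exact hlow hr

theorem fold_eq (cs : List Char) (acc : List Char) :
    cs.foldl (fun acc char =>
      if char = 'z' then acc ++ ['a']
      else (PySem.List.enumerate pvLetters).foldl (fun acc2 p =>
        if p.2 = char then acc2 ++ (PySem.List.pyGet? pvLetters (p.1 + 1)).toList else acc2) acc) acc
    = cs.foldl (fun acc c =>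
      if 'a'.toNat ≤ c.toNat ∧ c.toNat ≤ 'z'.toNat then
        acc ++ [Char.ofNat ((c.toNat - 'a'.toNat + 1) % 26 + 'a'.toNat)]
      else acc) acc := by
  induction cs generalizing acc with
  | nil => rfl
  | cons c t ih =>
    simp only [List.foldl_cons]
    rw [stepA_eq, stepB_eq, g_eq, ih]

-- ===== VERDICT (by name: the statement is the Claim_ definition above) =====
theorem alphabeticShift_spec : Claim_equal_alphabeticShift := by
  intro s _
  unfold Spec_alphabeticShift alphabeticShift alphabeticShift_alt
  rw [fold_eq]
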